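-- pv_equiv track=rewrite | github.com/benmtw/CommonFunctions | src/common_functions/domain_ratings.py | _choose_primary_format
-- ===== SOURCE A (Python) =====
-- from collections import Counter, defaultdict
--
-- _FORMAT_PRECEDENCE = [
--     "{first}.{last}",
--     "{first}_{last}",
--     "{first}-{last}",
--     "{first}{last}",
--     "{f}{last}",
--     "{f}.{last}",
--     "{f}_{last}",
--     "{first}{l}",
--     "{first}",
--     "{last}{f}",
--     "other",
--     "unknown",
-- ]
--
-- def _choose_primary_format(format_counts: Counter[str]) -> str:
--     if not format_counts:
--         return "unknown"
--     precedence = {value: index for index, value in enumerate(_FORMAT_PRECEDENCE)}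
--     items = sorted(
--         format_counts.items(),
--         key=lambda item: (-item[1], precedence.get(item[0], len(precedence))),
--     )
--     return items[0][0]
-- ===== SOURCE B (Python) =====
-- from collections import Counter
--
-- _FORMAT_PRECEDENCE = [
--     "{first}.{last}",
--     "{first}_{last}",
--     "{first}-{last}",
--     "{first}{last}",
--     "{f}{last}",
--     "{f}.{last}",
--     "{f}_{last}",
--     "{first}{l}",
--     "{first}",
--     "{last}{f}",
--     "other",
--     "unknown",
-- ]
--
-- def _choose_primary_format(format_counts: "Counter[str]") -> str:
--     if not format_counts:
--         return "unknown"
--     precedence = {value: index for index, value in enumerate(_FORMAT_PRECEDENCE)}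
--     n = len(precedence)
--     best_fmt = best_cnt = best_prec = None
--     for fmt, cnt in format_counts.items():
--         p = precedence.get(fmt, n)
--         if best_fmt is None or cnt > best_cnt or (cnt == best_cnt and p < best_prec):
--             best_fmt, best_cnt, best_prec = fmt, cnt, p
--     return best_fmt
-- ===== Notes on version B (the rewrite author's own statement) =====
-- stated objective: faster
-- what changed: Replaces the full stable sort of all items by a single linear best-so-far scan keeping the current (format, count, precedence) triple, replacing it only on strictly higher count or equal count with strictly smaller precedence, which reproduces the stable sort's first-element tie-break.
import Mathlib
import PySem

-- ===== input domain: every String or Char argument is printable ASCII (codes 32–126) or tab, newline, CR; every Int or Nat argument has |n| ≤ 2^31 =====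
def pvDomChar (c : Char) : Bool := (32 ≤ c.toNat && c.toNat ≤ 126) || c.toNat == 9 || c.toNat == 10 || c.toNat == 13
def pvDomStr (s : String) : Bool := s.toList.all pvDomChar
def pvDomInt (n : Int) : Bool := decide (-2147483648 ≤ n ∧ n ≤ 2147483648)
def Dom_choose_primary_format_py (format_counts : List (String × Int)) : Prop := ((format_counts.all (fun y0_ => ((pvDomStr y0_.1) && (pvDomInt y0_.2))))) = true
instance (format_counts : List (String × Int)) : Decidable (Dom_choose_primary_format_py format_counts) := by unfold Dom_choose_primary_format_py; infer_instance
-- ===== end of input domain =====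

-- B replaces A's full stable sort of the items by a single linear best-so-far scan (same result, one pass).


-- ===== PORT A =====
-- _FORMAT_PRECEDENCE
def fmtPrecedenceList : List String :=
  ["{first}.{last}", "{first}_{last}", "{first}-{last}", "{first}{last}",
   "{f}{last}", "{f}.{last}", "{f}_{last}", "{first}{l}", "{first}",
   "{last}{f}", "other", "unknown"]

-- precedence = {value: index for index, value in enumerate(_FORMAT_PRECEDENCE)}  (built by both Pythons identically)
def pvPrecDict : PySem.Dict String Int :=
  (PySem.List.enumerate fmtPrecedenceList).foldl
    (fun d iv => PySem.Dict.insert d iv.2 iv.1) (PySem.Dict.mk [])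

-- precedence.get(fmt, len(precedence))  (identical expression in both Pythons)
def pvPrecOf (s : String) : Int :=
  PySem.Dict.getD pvPrecDict s ((PySem.Dict.items pvPrecDict).length : Int)

def choose_primary_format_py (format_counts : List (String × Int)) : String :=
  if format_counts.isEmpty then "unknown"
  else
    -- items = sorted(format_counts.items(), key=lambda item: (-item[1], precedence.get(item[0], len(precedence))))
    let items := PySem.List.sorted2 format_counts (fun it => -it.2) (fun it => pvPrecOf it.1)
    -- items[0][0]; items is nonempty here, so headD's default is never used
    (items.headD ("", 0)).1

-- ===== PORT B =====
-- loop body: best_fmt is None / cnt > best_cnt / (cnt == best_cnt and p < best_prec)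
def altStep (best : Option (String × Int × Int)) (it : String × Int) : Option (String × Int × Int) :=
  let p := pvPrecOf it.1
  match best with
  | none => some (it.1, it.2, p)
  | some (bf, bc, bp) =>
    if bc < it.2 ∨ (it.2 = bc ∧ p < bp) then some (it.1, it.2, p)
    else some (bf, bc, bp)

def choose_primary_format_py_alt (format_counts : List (String × Int)) : String :=
  if format_counts.isEmpty then "unknown"
  else
    match format_counts.foldl altStep none with
    | some (bf, _, _) => bf
    | none => "unknown"

-- ===== PRECONDITION & SPEC =====
def Spec_choose_primary_format_py (format_counts : List (String × Int)) (out : String) : Prop := out = choose_primary_format_py_alt format_counts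
instance (format_counts : List (String × Int)) (out : String) : Decidable (Spec_choose_primary_format_py format_counts out) := by unfold Spec_choose_primary_format_py; infer_instance

-- ===== CLAIM (what is proved, stated in full; the proofs are below) =====
def Claim_equal_choose_primary_format_py : Prop := ∀ (format_counts : List (String × Int)), Dom_choose_primary_format_py format_counts → Spec_choose_primary_format_py format_counts (choose_primary_format_py format_counts)

-- ===== LEMMAS AND PROOFS =====

-- Head of an insertion-sort fold over a nonempty accumulator = best-so-far fold over the pending elements.
theorem head_foldl_insertBy {α : Type} (before : α → α → Bool) (d : α) :
    ∀ (l : List α) (y : α) (ys : List α),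
      (l.foldl (fun acc x => PySem.List.insertBy before x acc) (y :: ys)).headD d
        = l.foldl (fun b x => if before x b then x else b) y := by
  intro l
  induction l with
  | nil => intro y ys; simp
  | cons x l ih =>
    intro y ys
    simp only [List.foldl_cons, PySem.List.insertBy]
    by_cases h : before x y = true
    · rw [if_pos h, if_pos h]; exact ih x (y :: ys)
    · rw [if_neg h, if_neg h]; exact ih y (PySem.List.insertBy before x ys)

-- A's result on a nonempty list is the best-so-far fold with the sort's comparison.
theorem portA_eq_fold (x : String × Int) (l : List (String × Int)) :
    choose_primary_format_py (x :: l)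
      = (l.foldl (fun b it =>
          if (decide (-it.2 < -b.2) || (!decide (-b.2 < -it.2) && decide (pvPrecOf it.1 < pvPrecOf b.1))) then it else b) x).1 := by
  simp only [choose_primary_format_py, List.isEmpty_cons, if_false, Bool.false_eq_true,
    PySem.List.sorted2, List.foldl_cons, PySem.List.insertBy]
  rw [head_foldl_insertBy]

-- The sort's comparison is B's replacement condition.
theorem step_cond (it b : String × Int) :
    (if (decide (-it.2 < -b.2) || (!decide (-b.2 < -it.2) && decide (pvPrecOf it.1 < pvPrecOf b.1))) then it else b)
      = (if b.2 < it.2 ∨ (it.2 = b.2 ∧ pvPrecOf it.1 < pvPrecOf b.1) then it else b) := by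
  have h : ((-it.2 < -b.2) ∨ (¬(-b.2 < -it.2) ∧ pvPrecOf it.1 < pvPrecOf b.1))
      ↔ (b.2 < it.2 ∨ (it.2 = b.2 ∧ pvPrecOf it.1 < pvPrecOf b.1)) := by omega
  simp only [Bool.or_eq_true, Bool.and_eq_true, Bool.not_eq_eq_eq_not, Bool.not_true,
    decide_eq_true_eq, decide_eq_false_iff_not]
  split_ifs with h1 h2 h3 <;> first
    | rfl
    | (exact absurd (h.mp (by tauto)) h2)
    | (exact absurd (h.mpr h3) (by tauto))

-- altStep on a started (some) state, written out.
theorem altStep_some (b x : String × Int) :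
    altStep (some (b.1, b.2, pvPrecOf b.1)) x
      = if b.2 < x.2 ∨ (x.2 = b.2 ∧ pvPrecOf x.1 < pvPrecOf b.1)
        then some (x.1, x.2, pvPrecOf x.1) else some (b.1, b.2, pvPrecOf b.1) := rfl

-- B's option-state fold, once started, tracks the pair fold plus the cached precedence.
theorem portB_invariant :
    ∀ (l : List (String × Int)) (b : String × Int),
      l.foldl altStep (some (b.1, b.2, pvPrecOf b.1))
      = (fun r => some (r.1, r.2, pvPrecOf r.1))
          (l.foldl (fun b it =>
            if b.2 < it.2 ∨ (it.2 = b.2 ∧ pvPrecOf it.1 < pvPrecOf b.1) then it else b) b) := by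
  intro l
  induction l with
  | nil => intro b; rfl
  | cons x l ih =>
    intro b
    rw [List.foldl_cons, List.foldl_cons, altStep_some]
    by_cases h : b.2 < x.2 ∨ (x.2 = b.2 ∧ pvPrecOf x.1 < pvPrecOf b.1)
    · rw [if_pos h, if_pos h]; exact ih x
    · rw [if_neg h, if_neg h]; exact ih b

-- ===== VERDICT (by name: the statement is the Claim_ definition above) =====
theorem choose_primary_format_py_spec : Claim_equal_choose_primary_format_py := by
  intro fc _
  unfold Spec_choose_primary_format_py
  cases fc with
  | nil => rfl
  | cons x l =>
    rw [portA_eq_fold]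
    have hstep : (fun (b it : String × Int) =>
        if (decide (-it.2 < -b.2) || (!decide (-b.2 < -it.2) && decide (pvPrecOf it.1 < pvPrecOf b.1))) then it else b)
      = (fun (b it : String × Int) =>
        if b.2 < it.2 ∨ (it.2 = b.2 ∧ pvPrecOf it.1 < pvPrecOf b.1) then it else b) := by
      funext b it; exact step_cond it b
    rw [hstep]
    simp only [choose_primary_format_py_alt, List.isEmpty_cons, if_false, Bool.false_eq_true,
      List.foldl_cons]
    have h0 : altStep none x = some (x.1, x.2, pvPrecOf x.1) := rfl
    rw [h0, portB_invariant l x]
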